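-- pv_equiv track=rewrite | github.com/IIC2115/Syllabus-2020-1 | Laboratorios/L03/pauta.py | verificar_p1b
-- ===== SOURCE A (Python) =====
-- def seleccionar_vehiculos(vw, W):
--
-- 	indexes = []
--
-- 	T = [[0 for x in range(W + 1)] for y in range(len(vw) + 1)]
--
-- 	for i in range(1, len(vw) + 1):
-- 		for j in range(W + 1):
--
-- 			if vw[i - 1][1] > j:
-- 				T[i][j] = T[i - 1][j]
-- 			else:
-- 				indexes.append(i-1)
-- 				T[i][j] = max(T[i - 1][j], T[i - 1][j - vw[i - 1][1]] + vw[i - 1][0])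
--
-- 	return T[len(vw)][W]
--
-- def verificar_p1b(resp, inputs):
--     valor_optimo = seleccionar_vehiculos(*inputs)
--     valor_t = 0
--     tiempo_t = 0
--
--     for i in resp:
--         valor_t += inputs[0][i][0]
--         tiempo_t += inputs[0][i][1]
--
--     if valor_t == valor_optimo and tiempo_t <= inputs[1]:
--         return 1
--     else:
--         return 0
-- ===== SOURCE B (Python) =====
-- def verificar_p1b(resp, inputs):
--     vw, cap = inputs
--     # Sparse "pair list" knapsack (Nemhauser-Ullmann): instead of a DP table indexed
--     # by capacity, keep the Pareto frontier of reachable (weight, value) states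
--     # (strictly increasing in both coordinates, weights <= cap).
--     pareto = [(0, 0)]
--     for item in vw:
--         v, w = item[0], item[1]
--         shifted = [(pw + w, pv + v) for (pw, pv) in pareto if pw + w <= cap]
--         # merge the two lex-sorted state lists (two pointers)
--         cand = []
--         i = j = 0
--         while i < len(pareto) and j < len(shifted):
--             if pareto[i] <= shifted[j]:
--                 cand.append(pareto[i]); i += 1
--             else:
--                 cand.append(shifted[j]); j += 1
--         cand.extend(pareto[i:])
--         cand.extend(shifted[j:])
--         # prune dominated states: keep only strictly increasing values
--         merged = []
--         for p in cand:
--             if not merged: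
--                 merged.append(p)
--             elif p[1] > merged[-1][1]:
--                 if merged[-1][0] == p[0]:
--                     merged[-1] = p
--                 else:
--                     merged.append(p)
--         pareto = merged
--     valor_optimo = pareto[-1][1]
--     valor_t = 0
--     tiempo_t = 0
--     for i in resp:
--         valor_t += vw[i][0]
--         tiempo_t += vw[i][1]
--     if valor_t == valor_optimo and tiempo_t <= cap:
--         return 1
--     else:
--         return 0
-- ===== Notes on version B (the rewrite author's own statement) =====
-- stated objective: alternative
-- what changed: Replaces the dense (n+1)x(W+1) DP table (and its dead 'indexes' list) by the sparse pair-list (Nemhauser-Ullmann) knapsack: a Pareto frontier of undominated (weight, value) states, per item merged (two pointers) with its shifted copy and pruned of dominated states; the answer is the last frontier value.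
import Mathlib
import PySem

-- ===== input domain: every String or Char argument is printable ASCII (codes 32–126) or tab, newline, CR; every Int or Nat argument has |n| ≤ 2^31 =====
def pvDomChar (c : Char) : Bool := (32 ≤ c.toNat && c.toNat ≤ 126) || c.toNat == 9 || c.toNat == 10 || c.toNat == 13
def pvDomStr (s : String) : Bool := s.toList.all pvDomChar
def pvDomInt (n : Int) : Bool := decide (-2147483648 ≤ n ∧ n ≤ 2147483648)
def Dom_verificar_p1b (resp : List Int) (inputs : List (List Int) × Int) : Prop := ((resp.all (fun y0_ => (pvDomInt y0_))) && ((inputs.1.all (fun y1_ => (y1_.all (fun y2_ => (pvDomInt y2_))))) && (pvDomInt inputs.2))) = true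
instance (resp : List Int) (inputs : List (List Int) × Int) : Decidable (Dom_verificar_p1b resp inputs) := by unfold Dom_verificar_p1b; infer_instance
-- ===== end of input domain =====

-- B replaces A's dense (n+1)×(W+1) DP table by the sparse pair-list ("Pareto frontier")
-- knapsack algorithm: it maintains only the undominated (weight, value) states, merging and
-- pruning per item; equal return value on all inputs where A returns (Pre_), no mutation.

-- ===== PORT A =====
-- the write-only 'indexes' list of A never affects the result and is not carried;
-- pyGetD/pySetD are used for the list indexing/assignment: in range under Pre_ (Python raises outside).
def seleccionar_vehiculos (vw : List (List Int)) (W : Int) : Int :=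
  let T0 : List (List Int) :=
    (PySem.List.pyRange 0 ((vw.length : Int) + 1) 1).map (fun _ =>
      (PySem.List.pyRange 0 (W + 1) 1).map (fun _ => (0 : Int)))
  let T := (PySem.List.pyRange 1 ((vw.length : Int) + 1) 1).foldl (fun T i =>
    (PySem.List.pyRange 0 (W + 1) 1).foldl (fun T j =>
      if PySem.List.pyGetD (PySem.List.pyGetD vw (i - 1) []) 1 0 > j then
        PySem.List.pySetD T i (PySem.List.pySetD (PySem.List.pyGetD T i []) j
          (PySem.List.pyGetD (PySem.List.pyGetD T (i - 1) []) j 0))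
      else
        PySem.List.pySetD T i (PySem.List.pySetD (PySem.List.pyGetD T i []) j
          (max (PySem.List.pyGetD (PySem.List.pyGetD T (i - 1) []) j 0)
               (PySem.List.pyGetD (PySem.List.pyGetD T (i - 1) [])
                  (j - PySem.List.pyGetD (PySem.List.pyGetD vw (i - 1) []) 1 0) 0
                + PySem.List.pyGetD (PySem.List.pyGetD vw (i - 1) []) 0 0)))) T) T0
  PySem.List.pyGetD (PySem.List.pyGetD T (vw.length : Int) []) W 0

def verificar_p1b (resp : List Int) (inputs : List (List Int) × Int) : Int :=
  let valor_optimo := seleccionar_vehiculos inputs.1 inputs.2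
  let s := resp.foldl (fun (s : Int × Int) i =>
    (s.1 + PySem.List.pyGetD (PySem.List.pyGetD inputs.1 i []) 0 0,
     s.2 + PySem.List.pyGetD (PySem.List.pyGetD inputs.1 i []) 1 0)) ((0 : Int), (0 : Int))
  if s.1 = valor_optimo ∧ s.2 ≤ inputs.2 then 1 else 0

-- ===== PORT B =====
-- Source B's two-pointer 'while' merge of the two lex-sorted pair lists (plus the two
-- trailing 'extend's for the exhausted side): recursion on the unconsumed suffixes,
-- same comparison 'pareto[i] <= shifted[j]' (Python tuple ≤ = lexicographic).
def mergePairs : List (Int × Int) → List (Int × Int) → List (Int × Int)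
  | [], ys => ys
  | x :: xs, [] => x :: xs
  | x :: xs, y :: ys =>
      if x.1 < y.1 ∨ (x.1 = y.1 ∧ x.2 ≤ y.2) then x :: mergePairs xs (y :: ys)
      else y :: mergePairs (x :: xs) ys
termination_by xs ys => xs.length + ys.length

-- one iteration of Source B's pruning loop body over 'merged' (merged[-1] = getLast?;
-- 'merged[-1] = p' is dropLast ++ [p], 'merged.append(p)' is ++ [p])
def pruneStep (merged : List (Int × Int)) (p : Int × Int) : List (Int × Int) :=
  match merged.getLast? with
  | none => [p]
  | some q => if p.2 > q.2 then (if q.1 = p.1 then merged.dropLast ++ [p] else merged ++ [p])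
              else merged

def verificar_p1b_alt (resp : List Int) (inputs : List (List Int) × Int) : Int :=
  let vw := inputs.1
  let cap := inputs.2
  let pareto := vw.foldl (fun pareto item =>
    let v := PySem.List.pyGetD item 0 0
    let w := PySem.List.pyGetD item 1 0
    let shifted := (pareto.filter (fun p => decide (p.1 + w ≤ cap))).map
      (fun p => (p.1 + w, p.2 + v))
    (mergePairs pareto shifted).foldl pruneStep []) [((0 : Int), (0 : Int))]
  let valor_optimo := (PySem.List.pyGetD pareto (-1) ((0 : Int), (0 : Int))).2
  let s := resp.foldl (fun (s : Int × Int) i =>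
    (s.1 + PySem.List.pyGetD (PySem.List.pyGetD vw i []) 0 0,
     s.2 + PySem.List.pyGetD (PySem.List.pyGetD vw i []) 1 0)) ((0 : Int), (0 : Int))
  if s.1 = valor_optimo ∧ s.2 ≤ cap then 1 else 0

-- ===== PRECONDITION & SPEC =====
-- Pre_ = exactly the inputs where Python A returns: W ≥ 0 (else T[len][W] hits an empty row),
-- every item has ≥ 2 entries and nonnegative weight (a negative weight makes T[i-1][j-w] an
-- IndexError at j = W), and every resp index is a valid (possibly negative) Python index.
def Pre_verificar_p1b (resp : List Int) (inputs : List (List Int) × Int) : Prop :=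
  0 ≤ inputs.2 ∧ (∀ r ∈ inputs.1, 2 ≤ r.length ∧ 0 ≤ r.getD 1 0) ∧
    (∀ i ∈ resp, PySem.Raise.InRange inputs.1.length i)
instance (resp : List Int) (inputs : List (List Int) × Int) : Decidable (Pre_verificar_p1b resp inputs) := by unfold Pre_verificar_p1b; infer_instance

def pvWitness_verificar_p1b : List Int × (List (List Int) × Int) := ([0], ([[5, 3]], 4))

def Spec_verificar_p1b (resp : List Int) (inputs : List (List Int) × Int) (out : Int) : Prop := out = verificar_p1b_alt resp inputs
instance (resp : List Int) (inputs : List (List Int) × Int) (out : Int) : Decidable (Spec_verificar_p1b resp inputs out) := by unfold Spec_verificar_p1b; infer_instance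

-- ===== CLAIM (what is proved, stated in full; the proofs are below) =====
def Claim_equal_verificar_p1b : Prop := ∀ (resp : List Int) (inputs : List (List Int) × Int), Dom_verificar_p1b resp inputs → Pre_verificar_p1b resp inputs → Spec_verificar_p1b resp inputs (verificar_p1b resp inputs)

-- ===== LEMMAS AND PROOFS =====

lemma pyGetD_pySetD_int {α : Type} [Inhabited α] (xs : List α) (i j : Int) (v d : α) (hi : 0 ≤ i)
    (hj : 0 ≤ j) (hjl : j < (xs.length : Int)) :
    PySem.List.pyGetD (PySem.List.pySetD xs i v) j d =
      if j = i then v else PySem.List.pyGetD xs j d := by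
  rw [PySem.List.pySetD_of_nonneg xs v hi]
  rw [PySem.List.pyGetD_eq_getElem _ d hj (by simpa using hjl),
      PySem.List.pyGetD_eq_getElem _ d hj hjl]
  rw [List.getElem_set]
  by_cases hc : j = i
  · subst hc; simp
  · rw [if_neg (by omega), if_neg hc]

-- the functional DP both sides are reduced to
def stepK (f : Int → Int) (item : List Int) : Int → Int :=
  fun j => if PySem.List.pyGetD item 1 0 > j then f j
           else max (f j) (f (j - PySem.List.pyGetD item 1 0) + PySem.List.pyGetD item 0 0)

def knapP (vw : List (List Int)) (k : Nat) : Int → Int := (vw.take k).foldl stepK (fun _ => 0)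

-- ---- A side: the table row i is the functional DP after i items ----

def rowOfL (f : Int → Int) (W : Int) : List Int := (PySem.List.pyRange 0 (W + 1) 1).map f

lemma rowOf_ext (g : Int → Int) (W : Int) (xs : List Int)
    (hlen : xs.length = (W + 1).toNat)
    (h : ∀ j : Int, 0 ≤ j → j ≤ W → PySem.List.pyGetD xs j 0 = g j) :
    xs = rowOfL g W := by
  rw [rowOfL]
  apply List.ext_getElem
  · rw [hlen]; simp [PySem.List.length_pyRange_one]
  · intro k h1 h2
    rw [List.getElem_map, PySem.List.getElem_pyRange_one]
    have hk : (k : Int) ≤ W := by omega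
    have := h k (by positivity) hk
    rw [PySem.List.pyGetD_natCast] at this
    rw [List.getD_eq_getElem _ _ h1] at this
    rw [this]; norm_num

lemma rowOfL_get (f : Int → Int) (W j : Int) (h0 : 0 ≤ j) (h1 : j ≤ W) :
    PySem.List.pyGetD (rowOfL f W) j 0 = f j :=
  PySem.List.pyGetD_map_pyRange_of_nonneg f (W + 1) j 0 h0 (by omega)

lemma rowOfL_length (f : Int → Int) (W : Int) : (rowOfL f W).length = (W + 1).toNat := by
  simp [rowOfL, PySem.List.length_pyRange_one]

lemma knapP_succ (vw : List (List Int)) (k : Nat) (hk : k < vw.length) :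
    knapP vw (k + 1) = stepK (knapP vw k) (PySem.List.pyGetD vw (k : Int) []) := by
  rw [knapP, knapP, List.take_add_one, List.foldl_append]
  rw [PySem.List.pyGetD_natCast, List.getD_eq_getElem _ _ hk]
  simp [List.getElem?_eq_getElem hk]

lemma a_inner_aux (item : List Int) (i W : Int) (f : Int → Int)
    (hw : 0 ≤ PySem.List.pyGetD item 1 0) (hi1 : 1 ≤ i) :
    ∀ (d : Nat) (a : Int), a = W + 1 - d → 0 ≤ a →
    ∀ (T : List (List Int)), i < (T.length : Int) →
      (∀ j : Int, 0 ≤ j → j ≤ W → PySem.List.pyGetD (PySem.List.pyGetD T (i - 1) []) j 0 = f j) →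
      (PySem.List.pyGetD T i []).length = (W + 1).toNat →
      (∀ j : Int, 0 ≤ j → j < a → PySem.List.pyGetD (PySem.List.pyGetD T i []) j 0 = stepK f item j) →
      ((PySem.List.pyRange a (W + 1) 1).foldl (fun T j =>
        if PySem.List.pyGetD item 1 0 > j then
          PySem.List.pySetD T i (PySem.List.pySetD (PySem.List.pyGetD T i []) j
            (PySem.List.pyGetD (PySem.List.pyGetD T (i - 1) []) j 0))
        else
          PySem.List.pySetD T i (PySem.List.pySetD (PySem.List.pyGetD T i []) j
            (max (PySem.List.pyGetD (PySem.List.pyGetD T (i - 1) []) j 0)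
                 (PySem.List.pyGetD (PySem.List.pyGetD T (i - 1) [])
                    (j - PySem.List.pyGetD item 1 0) 0
                  + PySem.List.pyGetD item 0 0)))) T).length = T.length ∧
      (∀ k : Int, 0 ≤ k → k < (T.length : Int) → k ≠ i →
        PySem.List.pyGetD ((PySem.List.pyRange a (W + 1) 1).foldl (fun T j =>
        if PySem.List.pyGetD item 1 0 > j then
          PySem.List.pySetD T i (PySem.List.pySetD (PySem.List.pyGetD T i []) j
            (PySem.List.pyGetD (PySem.List.pyGetD T (i - 1) []) j 0))
        else
          PySem.List.pySetD T i (PySem.List.pySetD (PySem.List.pyGetD T i []) j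
            (max (PySem.List.pyGetD (PySem.List.pyGetD T (i - 1) []) j 0)
                 (PySem.List.pyGetD (PySem.List.pyGetD T (i - 1) [])
                    (j - PySem.List.pyGetD item 1 0) 0
                  + PySem.List.pyGetD item 0 0)))) T) k [] = PySem.List.pyGetD T k []) ∧
      (PySem.List.pyGetD ((PySem.List.pyRange a (W + 1) 1).foldl (fun T j =>
        if PySem.List.pyGetD item 1 0 > j then
          PySem.List.pySetD T i (PySem.List.pySetD (PySem.List.pyGetD T i []) j
            (PySem.List.pyGetD (PySem.List.pyGetD T (i - 1) []) j 0))
        else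
          PySem.List.pySetD T i (PySem.List.pySetD (PySem.List.pyGetD T i []) j
            (max (PySem.List.pyGetD (PySem.List.pyGetD T (i - 1) []) j 0)
                 (PySem.List.pyGetD (PySem.List.pyGetD T (i - 1) [])
                    (j - PySem.List.pyGetD item 1 0) 0
                  + PySem.List.pyGetD item 0 0)))) T) i []).length = (W + 1).toNat ∧
      (∀ j : Int, 0 ≤ j → j ≤ W →
        PySem.List.pyGetD (PySem.List.pyGetD ((PySem.List.pyRange a (W + 1) 1).foldl (fun T j =>
        if PySem.List.pyGetD item 1 0 > j then
          PySem.List.pySetD T i (PySem.List.pySetD (PySem.List.pyGetD T i []) j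
            (PySem.List.pyGetD (PySem.List.pyGetD T (i - 1) []) j 0))
        else
          PySem.List.pySetD T i (PySem.List.pySetD (PySem.List.pyGetD T i []) j
            (max (PySem.List.pyGetD (PySem.List.pyGetD T (i - 1) []) j 0)
                 (PySem.List.pyGetD (PySem.List.pyGetD T (i - 1) [])
                    (j - PySem.List.pyGetD item 1 0) 0
                  + PySem.List.pyGetD item 0 0)))) T) i []) j 0 = stepK f item j) := by
  intro d
  induction d with
  | zero =>
    intro a ha ha0 T hiT hprev hleni hparts
    rw [PySem.List.pyRange_one_eq_nil (by omega)]
    simp only [List.foldl_nil]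
    exact ⟨by simp, by simp, hleni, fun j h0 h1 => hparts j h0 (by omega)⟩
  | succ d ih =>
    intro a ha ha0 T hiT hprev hleni hparts
    rw [PySem.List.pyRange_one_cons (by omega)]
    simp only [List.foldl_cons]
    set w := PySem.List.pyGetD item 1 0 with hwdef
    set v := PySem.List.pyGetD item 0 0 with hvdef
    have hi0 : 0 ≤ i := by omega
    have haW : a ≤ W := by omega
    have hrowlen : ((PySem.List.pyGetD T i []).length : Int) = W + 1 := by rw [hleni]; omega
    set val : Int := if w > a then PySem.List.pyGetD (PySem.List.pyGetD T (i - 1) []) a 0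
      else max (PySem.List.pyGetD (PySem.List.pyGetD T (i - 1) []) a 0)
               (PySem.List.pyGetD (PySem.List.pyGetD T (i - 1) []) (a - w) 0 + v) with hvaldef
    have hbody : (if w > a then
          PySem.List.pySetD T i (PySem.List.pySetD (PySem.List.pyGetD T i []) a
            (PySem.List.pyGetD (PySem.List.pyGetD T (i - 1) []) a 0))
        else
          PySem.List.pySetD T i (PySem.List.pySetD (PySem.List.pyGetD T i []) a
            (max (PySem.List.pyGetD (PySem.List.pyGetD T (i - 1) []) a 0)
                 (PySem.List.pyGetD (PySem.List.pyGetD T (i - 1) []) (a - w) 0 + v))))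
        = PySem.List.pySetD T i (PySem.List.pySetD (PySem.List.pyGetD T i []) a val) := by
      by_cases hc : w > a
      · rw [if_pos hc, hvaldef, if_pos hc]
      · rw [if_neg hc, hvaldef, if_neg hc]
    rw [hbody]
    set T' := PySem.List.pySetD T i (PySem.List.pySetD (PySem.List.pyGetD T i []) a val) with hT'def
    have hT'len : T'.length = T.length := PySem.List.length_pySetD ..
    have hT'rowi : PySem.List.pyGetD T' i [] = PySem.List.pySetD (PySem.List.pyGetD T i []) a val := by
      rw [hT'def, pyGetD_pySetD_int T i i _ [] hi0 hi0 hiT, if_pos rfl]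
    have hT'other : ∀ k : Int, 0 ≤ k → k < (T.length : Int) → k ≠ i →
        PySem.List.pyGetD T' k [] = PySem.List.pyGetD T k [] := by
      intro k h0 h1 h2
      rw [hT'def, pyGetD_pySetD_int T i k _ [] hi0 h0 h1, if_neg h2]
    have hT'rowilen : (PySem.List.pyGetD T' i []).length = (W + 1).toNat := by
      rw [hT'rowi, PySem.List.length_pySetD]; exact hleni
    have hval : val = stepK f item a := by
      rw [hvaldef]
      simp only [stepK, ← hwdef, ← hvdef]
      by_cases hc : w > a
      · rw [if_pos hc, if_pos hc, hprev a ha0 haW]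
      · rw [if_neg hc, if_neg hc, hprev a ha0 haW, hprev (a - w) (by omega) (by omega)]
    have hT'parts : ∀ j : Int, 0 ≤ j → j < a + 1 →
        PySem.List.pyGetD (PySem.List.pyGetD T' i []) j 0 = stepK f item j := by
      intro j h0 h1
      rw [hT'rowi, pyGetD_pySetD_int _ a j _ 0 ha0 h0 (by omega)]
      by_cases hc : j = a
      · rw [if_pos hc, hval, hc]
      · rw [if_neg hc]; exact hparts j h0 (by omega)
    have hT'prev : ∀ j : Int, 0 ≤ j → j ≤ W →
        PySem.List.pyGetD (PySem.List.pyGetD T' (i - 1) []) j 0 = f j := by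
      intro j h0 h1
      rw [hT'other (i - 1) (by omega) (by omega) (by omega)]
      exact hprev j h0 h1
    have hres := ih (a + 1) (by omega) (by omega) T' (by rw [hT'len]; exact hiT)
      hT'prev hT'rowilen hT'parts
    refine ⟨by rw [hres.1, hT'len], ?_, hres.2.2.1, hres.2.2.2⟩
    intro k h0 h1 h2
    rw [hres.2.1 k h0 (by rw [hT'len]; exact h1) h2]
    exact hT'other k h0 h1 h2

lemma a_outer (vw : List (List Int)) (W : Int) (hW : 0 ≤ W)
    (hws : ∀ r ∈ vw, 0 ≤ PySem.List.pyGetD r 1 0) :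
    ∀ (d k : Nat) (T : List (List Int)), k + d = vw.length →
      T.length = vw.length + 1 →
      (∀ m : Nat, m ≤ k → PySem.List.pyGetD T (m : Int) [] = rowOfL (knapP vw m) W) →
      (∀ m : Nat, k < m → m ≤ vw.length → PySem.List.pyGetD T (m : Int) [] = rowOfL (fun _ => 0) W) →
      ∀ m : Nat, m ≤ vw.length →
        PySem.List.pyGetD ((PySem.List.pyRange ((k : Int) + 1) ((vw.length : Int) + 1) 1).foldl
          (fun T i =>
            (PySem.List.pyRange 0 (W + 1) 1).foldl (fun T j =>
              if PySem.List.pyGetD (PySem.List.pyGetD vw (i - 1) []) 1 0 > j then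
                PySem.List.pySetD T i (PySem.List.pySetD (PySem.List.pyGetD T i []) j
                  (PySem.List.pyGetD (PySem.List.pyGetD T (i - 1) []) j 0))
              else
                PySem.List.pySetD T i (PySem.List.pySetD (PySem.List.pyGetD T i []) j
                  (max (PySem.List.pyGetD (PySem.List.pyGetD T (i - 1) []) j 0)
                       (PySem.List.pyGetD (PySem.List.pyGetD T (i - 1) [])
                          (j - PySem.List.pyGetD (PySem.List.pyGetD vw (i - 1) []) 1 0) 0
                        + PySem.List.pyGetD (PySem.List.pyGetD vw (i - 1) []) 0 0)))) T) T)
          (m : Int) [] = rowOfL (knapP vw m) W := by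
  intro d
  induction d with
  | zero =>
    intro k T hkd hTlen h1 h2 m hm
    rw [PySem.List.pyRange_one_eq_nil (a := (k : Int) + 1) (b := (vw.length : Int) + 1) (by omega)]
    simp only [List.foldl_nil]
    exact h1 m (by omega)
  | succ d ih =>
    intro k T hkd hTlen h1 h2 m hm
    rw [PySem.List.pyRange_one_cons (a := (k : Int) + 1) (b := (vw.length : Int) + 1) (by omega)]
    simp only [List.foldl_cons]
    have e : ((k : Int) + 1 - 1) = (k : Int) := by omega
    have hklt : k < vw.length := by omega
    have hitem : 0 ≤ PySem.List.pyGetD (PySem.List.pyGetD vw ((k : Int) + 1 - 1) []) 1 0 := by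
      rw [e]
      apply hws
      rw [PySem.List.pyGetD_natCast, List.getD_eq_getElem _ _ hklt]
      exact List.getElem_mem hklt
    have hzero := h2 (k + 1) (by omega) (by omega)
    have haux := a_inner_aux (PySem.List.pyGetD vw ((k : Int) + 1 - 1) []) ((k : Int) + 1) W
      (knapP vw k) hitem (by omega) (W + 1).toNat 0 (by omega) le_rfl T
      (by rw [hTlen]; omega)
      (by rw [e]
          intro j hj0 hjW
          rw [h1 k le_rfl]
          exact rowOfL_get _ _ _ hj0 hjW)
      (by rw [show (((k + 1 : Nat) : Int)) = (k : Int) + 1 from by push_cast; ring] at hzero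
          rw [hzero, rowOfL_length])
      (by intro j hj0 hj1; omega)
    obtain ⟨hlen', hother', hleni', hparts'⟩ := haux
    have hrowi := rowOf_ext (stepK (knapP vw k) (PySem.List.pyGetD vw ((k : Int) + 1 - 1) [])) W _ hleni' hparts'
    have hstep : stepK (knapP vw k) (PySem.List.pyGetD vw ((k : Int) + 1 - 1) []) = knapP vw (k + 1) := by
      rw [e]; exact (knapP_succ vw k hklt).symm
    conv at hrowi => rhs; rw [hstep]
    refine ih (k + 1) _ (by omega) (by rw [hlen', hTlen]) ?_ ?_ m hm
    · intro m' hm'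
      rcases Nat.lt_or_ge m' (k + 1) with hlt | hge
      · rw [show (((m' : Nat) : Int)) = (m' : Int) from rfl]
        rw [hother' (m' : Int) (by positivity) (by rw [hTlen]; omega) (by omega)]
        exact h1 m' (by omega)
      · have : m' = k + 1 := by omega
        subst this
        rw [show (((k + 1 : Nat) : Int)) = (k : Int) + 1 from by push_cast; ring]
        exact hrowi
    · intro m' hm'1 hm'2
      rw [hother' (m' : Int) (by positivity) (by rw [hTlen]; omega) (by omega)]
      exact h2 m' (by omega) hm'2

lemma selec_eq (vw : List (List Int)) (W : Int) (hW : 0 ≤ W)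
    (hws : ∀ r ∈ vw, 0 ≤ PySem.List.pyGetD r 1 0) :
    seleccionar_vehiculos vw W = knapP vw vw.length W := by
  simp only [seleccionar_vehiculos]
  have hT0 : ∀ m : Nat, m ≤ vw.length →
      PySem.List.pyGetD ((PySem.List.pyRange 0 ((vw.length : Int) + 1) 1).map (fun _ =>
        (PySem.List.pyRange 0 (W + 1) 1).map (fun _ => (0 : Int)))) (m : Int) []
        = rowOfL (fun _ => 0) W := by
    intro m hm
    exact PySem.List.pyGetD_map_pyRange_of_nonneg _ _ _ _ (by positivity) (by omega)
  have hmain := a_outer vw W hW hws vw.length 0 _ (by omega)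
    (by rw [List.length_map, PySem.List.length_pyRange_one]; omega)
    (fun m hm => by
      have : m = 0 := by omega
      subst this
      exact hT0 0 (by omega))
    (fun m h1 h2 => hT0 m h2)
    vw.length le_rfl
  rw [show (((0 : Nat) : Int) + 1) = 1 from by norm_num] at hmain
  rw [hmain]
  exact rowOfL_get _ _ _ hW le_rfl

-- ---- B side: the pair-list algorithm computes the same functional DP ----

-- lexicographic ≤ on pairs (Python tuple ≤) and strict dominance order
def le1 (p q : Int × Int) : Prop := p.1 < q.1 ∨ (p.1 = q.1 ∧ p.2 ≤ q.2)
def lt2 (p q : Int × Int) : Prop := p.1 < q.1 ∧ p.2 < q.2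

lemma le1_trans {a b c : Int × Int} (h1 : le1 a b) (h2 : le1 b c) : le1 a c := by
  unfold le1 at *; omega

lemma mem_mergePairs (xs ys : List (Int × Int)) (a : Int × Int) :
    a ∈ mergePairs xs ys ↔ a ∈ xs ∨ a ∈ ys := by
  induction xs, ys using mergePairs.induct with
  | case1 ys => simp [mergePairs]
  | case2 x xs => simp [mergePairs]
  | case3 x xs y ys h ih =>
    rw [mergePairs, if_pos h]
    simp only [List.mem_cons, ih]
    tauto
  | case4 x xs y ys h ih =>
    rw [mergePairs, if_neg h]
    simp only [List.mem_cons, ih]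
    tauto

lemma pairwise_mergePairs (xs ys : List (Int × Int)) (hx : xs.Pairwise le1)
    (hy : ys.Pairwise le1) : (mergePairs xs ys).Pairwise le1 := by
  induction xs, ys using mergePairs.induct with
  | case1 ys => simpa [mergePairs] using hy
  | case2 x xs => simpa [mergePairs] using hx
  | case3 x xs y ys h ih =>
    rw [mergePairs, if_pos h]
    rw [List.pairwise_cons] at hx ⊢
    refine ⟨?_, ih hx.2 hy⟩
    intro b hb
    rw [mem_mergePairs] at hb
    rcases hb with hb | hb
    · exact hx.1 b hb
    · have hxy : le1 x y := h
      rcases List.mem_cons.mp hb with rfl | hb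
      · exact hxy
      · exact le1_trans hxy ((List.pairwise_cons.mp hy).1 b hb)
  | case4 x xs y ys h ih =>
    rw [mergePairs, if_neg h]
    rw [List.pairwise_cons] at hy ⊢
    refine ⟨?_, ih hx hy.2⟩
    have hyx : le1 y x := by unfold le1; omega
    intro b hb
    rw [mem_mergePairs] at hb
    rcases hb with hb | hb
    · rcases List.mem_cons.mp hb with rfl | hb
      · exact hyx
      · exact le1_trans hyx ((List.pairwise_cons.mp hx).1 b hb)
    · exact hy.1 b hb

-- the pruning fold: output is strictly increasing in both coordinates, a sublist of the
-- candidates (membership-wise), dominates every candidate, and is nonempty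
lemma prune_go : ∀ (cand acc : List (Int × Int)),
    cand.Pairwise le1 → acc.Pairwise lt2 → (∀ a ∈ acc, ∀ c ∈ cand, le1 a c) →
    (cand.foldl pruneStep acc).Pairwise lt2 ∧
    (∀ p ∈ cand.foldl pruneStep acc, p ∈ acc ∨ p ∈ cand) ∧
    (∀ q, (q ∈ acc ∨ q ∈ cand) →
      ∃ p ∈ cand.foldl pruneStep acc, p.1 ≤ q.1 ∧ q.2 ≤ p.2) ∧
    ((acc ≠ [] ∨ cand ≠ []) → cand.foldl pruneStep acc ≠ []) := by
  intro cand
  induction cand with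
  | nil =>
    intro acc hc ha hcross
    refine ⟨ha, fun p hp => Or.inl hp, ?_, ?_⟩
    · intro q hq
      rcases hq with hq | hq
      · exact ⟨q, hq, le_rfl, le_rfl⟩
      · simp at hq
    · intro h
      simp only [List.foldl_nil]
      rcases h with h | h
      · exact h
      · simp at h
  | cons p rest ih =>
    intro acc hc ha hcross
    simp only [List.foldl_cons]
    rw [List.pairwise_cons] at hc
    -- characterize acc' := pruneStep acc p and the domination of acc ∪ {p} by acc'
    have key : (pruneStep acc p).Pairwise lt2 ∧
        (∀ x ∈ pruneStep acc p, x ∈ acc ∨ x = p) ∧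
        (∀ x, (x ∈ acc ∨ x = p) → ∃ y ∈ pruneStep acc p, y.1 ≤ x.1 ∧ x.2 ≤ y.2) ∧
        pruneStep acc p ≠ [] := by
      rcases List.eq_nil_or_concat acc with rfl | ⟨as, q, rfl⟩
      case inl =>
        refine ⟨by simp [pruneStep], by simp [pruneStep], ?_, by simp [pruneStep]⟩
        intro x hx
        rcases hx with hx | rfl
        · simp at hx
        · exact ⟨x, by simp [pruneStep], le_rfl, le_rfl⟩
      case inr =>
        simp only [List.concat_eq_append] at ha hcross ⊢
        have hlast : (as ++ [q]).getLast? = some q := by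
          simp
        have hdrop : (as ++ [q]).dropLast = as := by simp
        rw [List.pairwise_append] at ha
        obtain ⟨haas, -, hacross⟩ := ha
        have hqle : le1 q p := hcross q (by simp) p (List.mem_cons_self ..)
        by_cases hv : p.2 > q.2
        · by_cases hw : q.1 = p.1
          · -- replace the last element
            have hstep : pruneStep (as ++ [q]) p = as ++ [p] := by
              simp only [pruneStep, hlast]
              rw [if_pos hv, if_pos hw, hdrop]
            rw [hstep]
            refine ⟨?_, ?_, ?_, by simp⟩
            · rw [List.pairwise_append]
              refine ⟨haas, by simp, ?_⟩
              intro a haa b hb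
              rcases List.mem_singleton.mp hb with rfl
              have := hacross a haa q (by simp)
              unfold lt2 at *; omega
            · intro x hx
              rcases List.mem_append.mp hx with hx | hx
              · exact Or.inl (by simp [hx])
              · exact Or.inr (List.mem_singleton.mp hx)
            · intro x hx
              rcases hx with hx | hxp
              · rcases List.mem_append.mp hx with hx | hx
                · exact ⟨x, by simp [hx], le_rfl, le_rfl⟩
                · have hxq := List.mem_singleton.mp hx
                  exact ⟨p, by simp, by rw [hxq]; omega, by rw [hxq]; omega⟩
              · exact ⟨p, by simp, by rw [hxp], by rw [hxp]⟩
          · -- append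
            have hstep : pruneStep (as ++ [q]) p = (as ++ [q]) ++ [p] := by
              simp only [pruneStep, hlast]
              rw [if_pos hv, if_neg hw]
            rw [hstep]
            refine ⟨?_, ?_, ?_, by simp⟩
            · rw [List.pairwise_append]
              refine ⟨List.pairwise_append.mpr ⟨haas, by simp, hacross⟩, by simp, ?_⟩
              intro a haa b hb
              rcases List.mem_singleton.mp hb with rfl
              rcases List.mem_append.mp haa with haa | haa
              · have h1 := hacross a haa q (by simp)
                have : le1 q b := hqle
                unfold lt2 le1 at *; omega
              · rcases List.mem_singleton.mp haa with rfl
                have : le1 a b := hqle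
                unfold lt2 le1 at *; omega
            · intro x hx
              rcases List.mem_append.mp hx with hx | hx
              · exact Or.inl hx
              · exact Or.inr (List.mem_singleton.mp hx)
            · intro x hx
              rcases hx with hx | hxp
              · exact ⟨x, List.mem_append_left _ hx, le_rfl, le_rfl⟩
              · exact ⟨p, by simp, by rw [hxp], by rw [hxp]⟩
        · -- skip p: dominated by q
          have hstep : pruneStep (as ++ [q]) p = as ++ [q] := by
            simp only [pruneStep, hlast]
            rw [if_neg hv]
          rw [hstep]
          refine ⟨List.pairwise_append.mpr ⟨haas, by simp, hacross⟩, fun x hx => Or.inl hx, ?_, by simp⟩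
          intro x hx
          rcases hx with hx | hxp
          · exact ⟨x, hx, le_rfl, le_rfl⟩
          · refine ⟨q, by simp, ?_, by rw [hxp]; omega⟩
            unfold le1 at hqle; rw [hxp]; omega
    obtain ⟨k1, k2, k3, k4⟩ := key
    have hcross' : ∀ a ∈ pruneStep acc p, ∀ c ∈ rest, le1 a c := by
      intro a haa c hcc
      rcases k2 a haa with haa' | rfl
      · exact hcross a haa' c (List.mem_cons_of_mem _ hcc)
      · exact hc.1 c hcc
    obtain ⟨i1, i2, i3, i4⟩ := ih (pruneStep acc p) hc.2 k1 hcross'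
    refine ⟨i1, ?_, ?_, ?_⟩
    · intro x hx
      rcases i2 x hx with hx' | hx'
      · rcases k2 x hx' with h | rfl
        · exact Or.inl h
        · exact Or.inr (List.mem_cons_self ..)
      · exact Or.inr (List.mem_cons_of_mem _ hx')
    · intro x hx
      have base : ∀ y, (y ∈ acc ∨ y = p) →
          ∃ r ∈ rest.foldl pruneStep (pruneStep acc p), r.1 ≤ y.1 ∧ y.2 ≤ r.2 := by
        intro y hy
        obtain ⟨z, hz, hz1, hz2⟩ := k3 y hy
        obtain ⟨r, hr, hr1, hr2⟩ := i3 z (Or.inl hz)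
        exact ⟨r, hr, by omega, by omega⟩
      rcases hx with hx | hx
      · exact base x (Or.inl hx)
      · rcases List.mem_cons.mp hx with rfl | hx
        · exact base x (Or.inr rfl)
        · exact i3 x (Or.inr hx)
    · intro _; exact i4 (Or.inl k4)

-- the invariant carried along B's item loop: L is the (strictly increasing, within-capacity)
-- Pareto frontier of the functional DP f
def ParetoInv (cap : Int) (f : Int → Int) (L : List (Int × Int)) : Prop :=
  L.Pairwise lt2 ∧ (∀ p ∈ L, 0 ≤ p.1 ∧ p.1 ≤ cap) ∧
  (∀ j : Int, 0 ≤ j → j ≤ cap →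
    (∃ p ∈ L, p.1 ≤ j ∧ p.2 = f j) ∧ (∀ p ∈ L, p.1 ≤ j → p.2 ≤ f j))

lemma bstep_inv (cap : Int) (item : List Int) (f : Int → Int) (L : List (Int × Int))
    (hw : 0 ≤ PySem.List.pyGetD item 1 0) (h : ParetoInv cap f L) :
    ParetoInv cap (stepK f item)
      ((mergePairs L ((L.filter (fun p => decide (p.1 + PySem.List.pyGetD item 1 0 ≤ cap))).map
        (fun p => (p.1 + PySem.List.pyGetD item 1 0, p.2 + PySem.List.pyGetD item 0 0)))).foldl
        pruneStep []) := by
  obtain ⟨hpw, hbnd, hdp⟩ := h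
  set w := PySem.List.pyGetD item 1 0 with hwdef
  set v := PySem.List.pyGetD item 0 0 with hvdef
  set shifted := (L.filter (fun p => decide (p.1 + w ≤ cap))).map (fun p => (p.1 + w, p.2 + v))
    with hsdef
  set cand := mergePairs L shifted with hcdef
  have hL1 : L.Pairwise le1 := hpw.imp (fun hab => Or.inl hab.1)
  have hs1 : shifted.Pairwise le1 := by
    rw [hsdef]
    exact List.Pairwise.map _ (fun a b hab => Or.inl (by have := hab.1; dsimp; omega))
      (hpw.filter _)
  have hcand : cand.Pairwise le1 := pairwise_mergePairs _ _ hL1 hs1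
  have hmem : ∀ a, a ∈ cand ↔ a ∈ L ∨ a ∈ shifted := fun a => mem_mergePairs L shifted a
  obtain ⟨r1, r2, r3, r4⟩ := prune_go cand [] hcand (by simp) (by simp)
  -- candidate-level bound
  have candBound : ∀ j : Int, 0 ≤ j → j ≤ cap → ∀ p ∈ cand, p.1 ≤ j → p.2 ≤ stepK f item j := by
    intro j hj0 hjc p hp hpj
    rw [hmem] at hp
    rcases hp with hp | hp
    · have := (hdp j hj0 hjc).2 p hp hpj
      unfold stepK
      rw [← hwdef, ← hvdef]
      split_ifs <;> omega
    · rw [hsdef] at hp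
      obtain ⟨q, hq, rfl⟩ := List.mem_map.mp hp
      have hqL := List.mem_filter.mp hq
      have hq0 := (hbnd q hqL.1).1
      dsimp at hpj ⊢
      have hwj : w ≤ j := by omega
      have hq2 : q.2 ≤ f (j - w) := (hdp (j - w) (by omega) (by omega)).2 q hqL.1 (by omega)
      unfold stepK
      rw [← hwdef, ← hvdef, if_neg (by omega)]
      omega
  -- candidate-level witness
  have candWit : ∀ j : Int, 0 ≤ j → j ≤ cap →
      ∃ p ∈ cand, p.1 ≤ j ∧ p.2 = stepK f item j := by
    intro j hj0 hjc
    by_cases hwj : w > j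
    · obtain ⟨p, hp, hp1, hp2⟩ := (hdp j hj0 hjc).1
      refine ⟨p, (hmem p).mpr (Or.inl hp), hp1, ?_⟩
      unfold stepK
      rw [← hwdef, if_pos hwj, hp2]
    · have hstep : stepK f item j = max (f j) (f (j - w) + v) := by
        unfold stepK
        rw [← hwdef, ← hvdef, if_neg (by omega)]
      rcases le_total (f (j - w) + v) (f j) with hm | hm
      · obtain ⟨p, hp, hp1, hp2⟩ := (hdp j hj0 hjc).1
        refine ⟨p, (hmem p).mpr (Or.inl hp), hp1, ?_⟩
        rw [hstep, hp2]; omega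
      · obtain ⟨q, hq, hq1, hq2⟩ := (hdp (j - w) (by omega) (by omega)).1
        refine ⟨(q.1 + w, q.2 + v), (hmem _).mpr (Or.inr ?_), by dsimp; omega, ?_⟩
        · rw [hsdef]
          exact List.mem_map.mpr ⟨q, List.mem_filter.mpr ⟨hq, by simp; omega⟩, rfl⟩
        · dsimp; rw [hstep]; omega
  refine ⟨r1, ?_, ?_⟩
  · intro p hp
    rcases r2 p hp with hp' | hp'
    · simp at hp'
    · rw [hmem] at hp'
      rcases hp' with hp' | hp'
      · exact hbnd p hp'
      · rw [hsdef] at hp'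
        obtain ⟨q, hq, rfl⟩ := List.mem_map.mp hp'
        have hqL := List.mem_filter.mp hq
        have := (hbnd q hqL.1).1
        have := of_decide_eq_true hqL.2
        constructor <;> dsimp <;> omega
  · intro j hj0 hjc
    constructor
    · obtain ⟨p, hp, hp1, hp2⟩ := candWit j hj0 hjc
      obtain ⟨r, hr, hr1, hr2⟩ := r3 p (Or.inr hp)
      have hrc : r ∈ cand := by
        rcases r2 r hr with h | h
        · simp at h
        · exact h
      have hub := candBound j hj0 hjc r hrc (by omega)
      exact ⟨r, hr, by omega, by omega⟩
    · intro p hp hpj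
      have hpc : p ∈ cand := by
        rcases r2 p hp with h | h
        · simp at h
        · exact h
      exact candBound j hj0 hjc p hpc hpj

lemma pareto_fold (cap : Int) :
    ∀ (items : List (List Int)) (f : Int → Int) (L : List (Int × Int)),
      (∀ it ∈ items, 0 ≤ PySem.List.pyGetD it 1 0) → ParetoInv cap f L →
      ParetoInv cap (items.foldl stepK f)
        (items.foldl (fun pareto item =>
          (mergePairs pareto
            ((pareto.filter (fun p => decide (p.1 + PySem.List.pyGetD item 1 0 ≤ cap))).map
              (fun p => (p.1 + PySem.List.pyGetD item 1 0, p.2 + PySem.List.pyGetD item 0 0)))).foldl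
            pruneStep []) L) := by
  intro items
  induction items with
  | nil => intro f L _ h; exact h
  | cons item rest ih =>
    intro f L hws h
    simp only [List.foldl_cons]
    exact ih _ _ (fun it hit => hws it (List.mem_cons_of_mem _ hit))
      (bstep_inv cap item f L (hws item (List.mem_cons_self ..)) h)

lemma pareto_last (cap : Int) (f : Int → Int) (L : List (Int × Int)) (hcap : 0 ≤ cap)
    (h : ParetoInv cap f L) :
    (PySem.List.pyGetD L (-1) ((0 : Int), (0 : Int))).2 = f cap := by
  obtain ⟨hpw, hbnd, hdp⟩ := h
  obtain ⟨⟨p, hp, hp1, hp2⟩, hub⟩ := hdp cap hcap le_rfl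
  rcases List.eq_nil_or_concat L with rfl | ⟨as, q, rfl⟩
  · simp at hp
  · simp only [List.concat_eq_append] at hp hub hbnd hpw ⊢
    rw [PySem.List.pyGetD_neg_one_append_singleton]
    rw [List.pairwise_append] at hpw
    have hq : q.2 ≤ f cap := hub q (by simp) (hbnd q (by simp)).2
    rcases List.mem_append.mp hp with hp' | hp'
    · have := hpw.2.2 p hp' q (by simp)
      unfold lt2 at this; omega
    · rcases List.mem_singleton.mp hp' with rfl; omega

-- ===== VERDICT (by name: the statement is the Claim_ definition above) =====
theorem verificar_p1b_spec : Claim_equal_verificar_p1b := by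
  intro resp inputs hdom hpre
  obtain ⟨vw, W⟩ := inputs
  obtain ⟨hW, hrows, hidx⟩ := hpre
  have hws : ∀ r ∈ vw, 0 ≤ PySem.List.pyGetD r 1 0 := by
    intro r hr
    rw [PySem.List.pyGetD_ofNat' r 1 0]
    exact (hrows r hr).2
  unfold Spec_verificar_p1b
  simp only [verificar_p1b, verificar_p1b_alt]
  have hbase : ParetoInv W (fun _ => (0 : Int)) [((0 : Int), (0 : Int))] := by
    refine ⟨by simp, by simp; omega, ?_⟩
    intro j hj0 hjc
    exact ⟨⟨(0, 0), by simp, hj0, rfl⟩, by simp⟩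
  have hinv := pareto_fold W vw (fun _ => (0 : Int)) [((0 : Int), (0 : Int))] hws hbase
  have hlast := pareto_last W (vw.foldl stepK (fun _ => 0)) _ hW hinv
  have hknap : knapP vw vw.length = vw.foldl stepK (fun _ => 0) := by
    rw [knapP, List.take_length]
  rw [selec_eq vw W hW hws, hknap, hlast]
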